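-- pv_equiv track=rewrite | github.com/teamWSIZ/AI2022 | sequence_prediction/transformer/corpus_generators.py | get_periodic_samples
-- ===== SOURCE A (Python) =====
-- def get_periodic_samples(length=10000, dist=3) -> list[int]:
--     # alphabet = 0,1,2,3; repeating pattern of 000213000213000213000213...
--     journey = []
--     pat = [0] * dist
--     pat.extend([2, 1, 3])
--     while len(journey) < length:
--         journey.extend(pat)
--     journey = journey[:length]
--     return journey
-- ===== SOURCE B (Python) =====
-- def get_periodic_samples(length=10000, dist=3) -> list[int]:
--     # one period, then per-index modular lookup over positions 0..length-1
--     pat = [0] * dist + [2, 1, 3]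
--     p = len(pat)
--     return [pat[i % p] for i in range(length)]
-- ===== Notes on version B (the rewrite author's own statement) =====
-- stated objective: alternative
-- what changed: B builds the single period once and produces each element by per-index modular lookup (pat[i % p] for i in range(length)) instead of A's extend-whole-blocks-until-long-enough-then-slice loop.
import Mathlib
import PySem

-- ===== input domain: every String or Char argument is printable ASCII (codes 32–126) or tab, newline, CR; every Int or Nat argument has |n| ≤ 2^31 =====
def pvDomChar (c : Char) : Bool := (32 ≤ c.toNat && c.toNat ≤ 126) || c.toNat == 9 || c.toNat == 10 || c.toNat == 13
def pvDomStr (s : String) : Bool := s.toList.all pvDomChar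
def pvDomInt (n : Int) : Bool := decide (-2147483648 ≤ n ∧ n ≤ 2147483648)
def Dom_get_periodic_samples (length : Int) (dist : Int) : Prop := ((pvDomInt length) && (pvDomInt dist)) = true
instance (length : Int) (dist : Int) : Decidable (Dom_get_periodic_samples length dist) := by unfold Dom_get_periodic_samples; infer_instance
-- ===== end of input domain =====

-- B replaces A's extend-blocks-then-slice loop by per-index modular lookup into the single period (alternative decomposition, same cost).

-- ===== PORT A =====
-- pat = [0] * dist; pat.extend([2, 1, 3])
def patA (dist : Int) : List Int := List.replicate dist.toNat 0 ++ [2, 1, 3]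

-- while len(journey) < length: journey.extend(pat)
def loopA (length dist : Int) (journey : List Int) : List Int :=
  if _h : (journey.length : Int) < length then
    loopA length dist (journey ++ patA dist)
  else journey
termination_by (length - journey.length).toNat
decreasing_by
  simp [patA]
  omega

def get_periodic_samples (length : Int) (dist : Int) : List Int :=
  PySem.List.slice (loopA length dist []) none (some length)

-- ===== PORT B =====
def get_periodic_samples_alt (length : Int) (dist : Int) : List Int :=
  let pat := List.replicate dist.toNat 0 ++ [2, 1, 3]
  let p : Int := pat.length
  (PySem.List.pyRange 0 length 1).map (fun i => PySem.List.pyGetD pat (PySem.Int.mod i p) 0)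

-- ===== PRECONDITION & SPEC =====
def Spec_get_periodic_samples (length : Int) (dist : Int) (out : List Int) : Prop := out = get_periodic_samples_alt length dist
instance (length : Int) (dist : Int) (out : List Int) : Decidable (Spec_get_periodic_samples length dist out) := by unfold Spec_get_periodic_samples; infer_instance

-- ===== CLAIM (what is proved, stated in full; the proofs are below) =====
def Claim_equal_get_periodic_samples : Prop := ∀ (length : Int) (dist : Int), Dom_get_periodic_samples length dist → Spec_get_periodic_samples length dist (get_periodic_samples length dist)

-- ===== LEMMAS AND PROOFS =====

-- k concatenated copies of pat
def repeatN : Nat → List Int → List Int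
  | 0, _ => []
  | k + 1, pat => pat ++ repeatN k pat

theorem length_repeatN (k : Nat) (pat : List Int) : (repeatN k pat).length = k * pat.length := by
  induction k with
  | zero => simp [repeatN]
  | succ k ih => simp [repeatN, ih]; ring

theorem repeatN_comm (pat : List Int) (j : Nat) :
    pat ++ repeatN j pat = repeatN j pat ++ pat := by
  induction j with
  | zero => simp [repeatN]
  | succ j ih => simp only [repeatN, List.append_assoc]; rw [← ih]

theorem repeatN_succ_right (pat : List Int) (j : Nat) :
    repeatN (j + 1) pat = repeatN j pat ++ pat := by
  simp only [repeatN]; exact repeatN_comm pat j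

theorem repeatN_get (pat : List Int) (_hp : 0 < pat.length) (k i : Nat) (hi : i < k * pat.length) :
    (repeatN k pat)[i]? = pat[i % pat.length]? := by
  induction k generalizing i with
  | zero => omega
  | succ k ih =>
    rw [Nat.succ_mul] at hi
    simp only [repeatN]
    by_cases hlt : i < pat.length
    · rw [List.getElem?_append_left hlt, Nat.mod_eq_of_lt hlt]
    · have h1 : pat.length ≤ i := by omega
      rw [List.getElem?_append_right h1, ih (i - pat.length) (by omega)]
      congr 1
      conv_rhs => rw [show i = i - pat.length + pat.length from (Nat.sub_add_cancel h1).symm]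
      rw [Nat.add_mod_right]

theorem loopA_repeat (length dist : Int) (j : Nat) :
    ∃ k, j ≤ k ∧ loopA length dist (repeatN j (patA dist)) = repeatN k (patA dist) := by
  by_cases h : ((repeatN j (patA dist)).length : Int) < length
  · have := loopA_repeat length dist (j + 1)
    obtain ⟨k, hk, hek⟩ := this
    refine ⟨k, by omega, ?_⟩
    rw [loopA, dif_pos h, ← repeatN_succ_right]
    exact hek
  · exact ⟨j, le_refl _, by rw [loopA]; simp [h]⟩
termination_by (length - (repeatN j (patA dist)).length).toNat
decreasing_by
  have h3 : (patA dist).length = dist.toNat + 3 := by simp [patA]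
  have h4 := length_repeatN j (patA dist)
  have h5 := length_repeatN (j + 1) (patA dist)
  have h6 : (j + 1) * (patA dist).length = j * (patA dist).length + (patA dist).length :=
    Nat.succ_mul j (patA dist).length
  omega

theorem loopA_long (length dist : Int) (journey : List Int) :
    length ≤ ((loopA length dist journey).length : Int) := by
  by_cases h : ((journey.length : Int)) < length
  · rw [loopA]
    simp only [h, dif_pos]
    exact loopA_long length dist (journey ++ patA dist)
  · rw [loopA]; simp only [h, dif_neg, not_false_iff]; omega
termination_by (length - journey.length).toNat
decreasing_by
  simp [patA]
  omega

-- ===== VERDICT (by name: the statement is the Claim_ definition above) =====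
theorem get_periodic_samples_spec : Claim_equal_get_periodic_samples := by
  unfold Claim_equal_get_periodic_samples Spec_get_periodic_samples
  intro length dist _
  unfold get_periodic_samples get_periodic_samples_alt
  rw [show (List.replicate dist.toNat 0 ++ [2, 1, 3] : List Int) = patA dist from rfl]
  obtain ⟨k, -, hek⟩ := loopA_repeat length dist 0
  have hlong := loopA_long length dist []
  rw [show repeatN 0 (patA dist) = [] from rfl] at hek
  rw [hek] at hlong ⊢
  have hp : 0 < (patA dist).length := by simp [patA]
  have hplen : (patA dist).length = dist.toNat + 3 := by simp [patA]
  by_cases hlen : 0 ≤ length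
  · rw [PySem.List.slice_to _ hlen]
    rw [show length = ((length.toNat : Nat) : Int) from (Int.toNat_of_nonneg hlen).symm]
    rw [Int.toNat_natCast]
    apply List.ext_getElem?
    intro i
    have hrl := length_repeatN k (patA dist)
    have hln : ((length.toNat : Int)) ≤ (k : Int) * ((patA dist).length : Int) := by
      rw [hrl] at hlong; push_cast at hlong ⊢; omega
    by_cases hi : i < length.toNat
    · rw [List.getElem?_take]
      simp only [hi, if_pos]
      have hik : i < k * (patA dist).length := by
        have : ((i : Int)) < (k : Int) * ((patA dist).length : Int) := by
          have : ((i : Int)) < (length.toNat : Int) := by exact_mod_cast hi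
          omega
        exact_mod_cast this
      rw [repeatN_get (patA dist) hp k i hik]
      rw [PySem.List.getElem?_map_pyRange_zero _ _ _ (by omega)]
      have hmod : PySem.Int.mod (i : Int) (((patA dist).length : Nat) : Int)
          = ((i % (patA dist).length : Nat) : Int) := by
        rw [PySem.Int.mod_eq_emod_of_pos (by exact_mod_cast hp)]
        exact_mod_cast Int.ofNat_mod_ofNat i (patA dist).length
      rw [hmod, PySem.List.pyGetD_natCast]
      rw [List.getD_eq_getElem?_getD, List.getElem?_eq_getElem (Nat.mod_lt _ hp)]
      simp
    · rw [List.getElem?_take]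
      simp only [hi, if_neg, not_false_iff]
      rw [List.getElem?_eq_none]
      simp [PySem.List.length_pyRange_one]
      omega
  · have hnil : repeatN k (patA dist) = [] := by
      rw [← hek, loopA]
      simp only [List.length_nil, Int.natCast_zero]
      rw [dif_neg (by omega)]
    rw [hnil]
    rw [PySem.List.pyRange_one_eq_nil (by omega)]
    simp [PySem.List.slice]
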